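-- pv_equiv track=rewrite | github.com/selcuk-yalcin/agenticAI | projects/incident_investigation/agents/root_cause_analyzer.py | map_to_regulatory_standards
-- ===== SOURCE A (Python) =====
-- from typing import Dict, List, Any, Optional
--
-- def map_to_regulatory_standards(causes: List[Dict], standards: List[str]) -> Dict:
--     """
--     Map identified causes to regulatory standard violations.
--
--     Args:
--         causes: List of identified causes
--         standards: Applicable standards (OSHA_PSM, API_RP_754, etc.)
--
--     Returns:
--         Mapping of causes to standard elements
--     """
--     mapping = {}
--
--     # OSHA PSM mapping
--     if "OSHA_PSM" in standards:
--         osha_psm_elements = {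
--             "Process Safety Information": [],
--             "Process Hazard Analysis": [],
--             "Operating Procedures": [],
--             "Training": [],
--             "Contractors": [],
--             "Pre-Startup Safety Review": [],
--             "Mechanical Integrity": [],
--             "Management of Change": [],
--             "Incident Investigation": [],
--             "Emergency Planning and Response": [],
--             "Compliance Audits": []
--         }
--
--         # Map causes to elements
--         for cause in causes:
--             cause_text = cause.get("cause", "").lower()
--
--             if "training" in cause_text:
--                 osha_psm_elements["Training"].append(cause)
--             elif "procedure" in cause_text:
--                 osha_psm_elements["Operating Procedures"].append(cause)
--             elif "moc" in cause_text or "management of change" in cause_text: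
--                 osha_psm_elements["Management of Change"].append(cause)
--             elif "maintenance" in cause_text or "mechanical integrity" in cause_text:
--                 osha_psm_elements["Mechanical Integrity"].append(cause)
--
--         mapping["OSHA_PSM"] = osha_psm_elements
--
--     return mapping
-- ===== SOURCE B (Python) =====
-- from typing import Dict, List
--
-- _PSM_ELEMENTS = [
--     "Process Safety Information",
--     "Process Hazard Analysis",
--     "Operating Procedures",
--     "Training",
--     "Contractors",
--     "Pre-Startup Safety Review",
--     "Mechanical Integrity",
--     "Management of Change",
--     "Incident Investigation",
--     "Emergency Planning and Response",
--     "Compliance Audits",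
-- ]
--
-- def _element_for(text: str):
--     """First-match OSHA PSM element for a lowercased cause text, or None."""
--     if "training" in text:
--         return "Training"
--     if "procedure" in text:
--         return "Operating Procedures"
--     if "moc" in text or "management of change" in text:
--         return "Management of Change"
--     if "maintenance" in text or "mechanical integrity" in text:
--         return "Mechanical Integrity"
--     return None
--
-- def map_to_regulatory_standards(causes: List[Dict], standards: List[str]) -> Dict:
--     if "OSHA_PSM" not in standards:
--         return {}
--     # Stage 1: label every cause once with its target element (or None).
--     labels = [_element_for(c.get("cause", "").lower()) for c in causes]
--     # Stage 2: build each bucket by its own filtering pass over the labeled causes.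
--     elements = {
--         name: [c for lab, c in zip(labels, causes) if lab == name]
--         for name in _PSM_ELEMENTS
--     }
--     return {"OSHA_PSM": elements}
-- ===== Notes on version B (the rewrite author's own statement) =====
-- stated objective: alternative
-- what changed: Instead of one pass mutating a pre-built dict via an if/elif chain, B labels every cause once with a pure classifier and then constructs each of the 11 buckets by its own filtering pass over the labeled causes (loop transposition: grouping by per-element filters instead of per-cause dict mutation).
import Mathlib
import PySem

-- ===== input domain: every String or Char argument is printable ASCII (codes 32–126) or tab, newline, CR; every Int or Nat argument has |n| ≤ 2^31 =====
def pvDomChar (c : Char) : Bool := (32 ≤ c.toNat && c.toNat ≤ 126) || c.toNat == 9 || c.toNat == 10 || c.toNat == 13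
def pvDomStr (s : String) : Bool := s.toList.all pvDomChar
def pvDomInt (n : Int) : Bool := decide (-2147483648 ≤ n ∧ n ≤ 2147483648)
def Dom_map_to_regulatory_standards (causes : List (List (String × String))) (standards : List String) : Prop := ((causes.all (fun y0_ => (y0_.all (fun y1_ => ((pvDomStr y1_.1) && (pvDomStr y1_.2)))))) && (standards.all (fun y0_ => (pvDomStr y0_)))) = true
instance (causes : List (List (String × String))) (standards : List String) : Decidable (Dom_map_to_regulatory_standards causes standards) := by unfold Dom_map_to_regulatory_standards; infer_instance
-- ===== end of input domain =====

-- B replaces A's single dict-mutating pass (if/elif chain appending into a pre-built dict) by a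
-- two-stage construction: label every cause once with a pure classifier, then build each of the
-- 11 buckets by its own filtering pass over the labeled causes (same return value, same cost class).

-- ===== PORT A =====
-- one if/elif step of A's loop body
def pvStepA (d : PySem.Dict String (List (List (String × String)))) (cause : List (String × String)) :
    PySem.Dict String (List (List (String × String))) :=
  let causeText := PySem.Str.lower ((PySem.Dict.mk cause).getD "cause" "")
  if PySem.Str.isIn "training" causeText then
    d.modify "Training" [] (fun l => l ++ [cause])
  else if PySem.Str.isIn "procedure" causeText then
    d.modify "Operating Procedures" [] (fun l => l ++ [cause])
  else if PySem.Str.isIn "moc" causeText || PySem.Str.isIn "management of change" causeText then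
    d.modify "Management of Change" [] (fun l => l ++ [cause])
  else if PySem.Str.isIn "maintenance" causeText || PySem.Str.isIn "mechanical integrity" causeText then
    d.modify "Mechanical Integrity" [] (fun l => l ++ [cause])
  else d

def map_to_regulatory_standards (causes : List (List (String × String))) (standards : List String) :
    List (String × List (String × List (List (String × String)))) :=
  let mapping : PySem.Dict String (List (String × List (List (String × String)))) := PySem.Dict.empty
  if standards.contains "OSHA_PSM" then
    let oshaPsmElements : PySem.Dict String (List (List (String × String))) :=
      PySem.Dict.ofList
        [("Process Safety Information", []), ("Process Hazard Analysis", []),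
         ("Operating Procedures", []), ("Training", []), ("Contractors", []),
         ("Pre-Startup Safety Review", []), ("Mechanical Integrity", []),
         ("Management of Change", []), ("Incident Investigation", []),
         ("Emergency Planning and Response", []), ("Compliance Audits", [])]
    let oshaPsmElements := causes.foldl pvStepA oshaPsmElements
    (mapping.insert "OSHA_PSM" oshaPsmElements.items).items
  else
    mapping.items

-- ===== PORT B =====
def pvPsmElements : List String :=
  ["Process Safety Information", "Process Hazard Analysis", "Operating Procedures",
   "Training", "Contractors", "Pre-Startup Safety Review", "Mechanical Integrity",
   "Management of Change", "Incident Investigation", "Emergency Planning and Response",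
   "Compliance Audits"]

-- B's pure classifier: first-match element for a lowercased cause text, or none
def pvElementFor (text : String) : Option String :=
  if PySem.Str.isIn "training" text then some "Training"
  else if PySem.Str.isIn "procedure" text then some "Operating Procedures"
  else if PySem.Str.isIn "moc" text || PySem.Str.isIn "management of change" text then some "Management of Change"
  else if PySem.Str.isIn "maintenance" text || PySem.Str.isIn "mechanical integrity" text then some "Mechanical Integrity"
  else none

def map_to_regulatory_standards_alt (causes : List (List (String × String))) (standards : List String) :
    List (String × List (String × List (List (String × String)))) :=
  if !(standards.contains "OSHA_PSM") then []
  else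
    let labels := causes.map (fun c => pvElementFor (PySem.Str.lower ((PySem.Dict.mk c).getD "cause" "")))
    let elements := pvPsmElements.map (fun name =>
      (name, ((labels.zip causes).filter (fun p => p.1 == some name)).map (·.2)))
    [("OSHA_PSM", elements)]

-- ===== PRECONDITION & SPEC =====
def Spec_map_to_regulatory_standards (causes : List (List (String × String))) (standards : List String) (out : List (String × List (String × List (List (String × String))))) : Prop := out = map_to_regulatory_standards_alt causes standards
instance (causes : List (List (String × String))) (standards : List String) (out : List (String × List (String × List (List (String × String))))) : Decidable (Spec_map_to_regulatory_standards causes standards out) := by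
  unfold Spec_map_to_regulatory_standards
  letI a : DecidableEq (List (List (String × String))) := inferInstance
  letI b : DecidableEq (List (String × List (List (String × String)))) := inferInstance
  letI c : DecidableEq (String × List (String × List (List (String × String)))) := inferInstance
  infer_instance

-- ===== CLAIM (what is proved, stated in full; the proofs are below) =====
def Claim_equal_map_to_regulatory_standards : Prop := ∀ (causes : List (List (String × String))) (standards : List String), Dom_map_to_regulatory_standards causes standards → Spec_map_to_regulatory_standards causes standards (map_to_regulatory_standards causes standards)

-- ===== LEMMAS AND PROOFS =====
-- B's label of a cause
def pvLabel (c : List (String × String)) : Option String :=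
  pvElementFor (PySem.Str.lower ((PySem.Dict.mk c).getD "cause" ""))

-- A's step, written through B's classifier
theorem pvStepA_eq_label (d : PySem.Dict String (List (List (String × String)))) (c : List (String × String)) :
    pvStepA d c = match pvLabel c with
      | some k => d.modify k [] (fun l => l ++ [c])
      | none => d := by
  unfold pvStepA pvLabel pvElementFor
  simp only []
  split_ifs <;> rfl

theorem pvInit_keys :
    (PySem.Dict.ofList
        [("Process Safety Information", ([] : List (List (String × String)))), ("Process Hazard Analysis", []),
         ("Operating Procedures", []), ("Training", []), ("Contractors", []),
         ("Pre-Startup Safety Review", []), ("Mechanical Integrity", []),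
         ("Management of Change", []), ("Incident Investigation", []),
         ("Emergency Planning and Response", []), ("Compliance Audits", [])]).keys = pvPsmElements := by
  decide

-- any label is one of the 11 element names
theorem pvLabel_mem (c : List (String × String)) (k : String) (h : pvLabel c = some k) : k ∈ pvPsmElements := by
  unfold pvLabel pvElementFor at h
  split_ifs at h <;> simp_all [pvPsmElements]

-- keys are preserved by the fold
theorem keys_fold (causes : List (List (String × String)))
    (d : PySem.Dict String (List (List (String × String)))) (hk : d.keys = pvPsmElements) :
    (causes.foldl pvStepA d).keys = pvPsmElements := by
  induction causes generalizing d with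
  | nil => exact hk
  | cons c cs ih =>
    simp only [List.foldl_cons]
    apply ih
    rw [pvStepA_eq_label]
    cases h : pvLabel c with
    | none => exact hk
    | some k =>
      have hc : d.contains k = true := by
        rw [PySem.Dict.contains_eq_decide_mem_keys, hk]
        simp [pvLabel_mem c k h]
      rw [PySem.Dict.keys_modify, PySem.Dict.keys_insert_of_contains _ _ hc, hk]

-- pointwise value of the fold
theorem getD_fold (causes : List (List (String × String)))
    (d : PySem.Dict String (List (List (String × String)))) (n : String) :
    (causes.foldl pvStepA d).getD n [] =
      d.getD n [] ++ (((causes.map pvLabel).zip causes).filter (fun p => p.1 == some n)).map (·.2) := by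
  induction causes generalizing d with
  | nil => simp
  | cons c cs ih =>
    simp only [List.foldl_cons, List.map_cons, List.zip_cons_cons, List.filter_cons]
    rw [ih, pvStepA_eq_label]
    cases h : pvLabel c with
    | none =>
      simp
    | some k =>
      by_cases hn : n = k
      · subst hn
        simp [PySem.Dict.getD_modify_self]
      · simp [Ne.symm hn, PySem.Dict.getD_modify_of_ne _ _ _ hn]

-- ===== VERDICT (by name: the statement is the Claim_ definition above) =====
theorem map_to_regulatory_standards_spec : Claim_equal_map_to_regulatory_standards := by
  intro causes standards _
  unfold Spec_map_to_regulatory_standards map_to_regulatory_standards map_to_regulatory_standards_alt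
  cases h : standards.contains "OSHA_PSM"
  · rfl
  · simp only [Bool.not_true, if_true, Bool.false_eq_true, if_false]
    set init := PySem.Dict.ofList
        [("Process Safety Information", ([] : List (List (String × String)))), ("Process Hazard Analysis", []),
         ("Operating Procedures", []), ("Training", []), ("Contractors", []),
         ("Pre-Startup Safety Review", []), ("Mechanical Integrity", []),
         ("Management of Change", []), ("Incident Investigation", []),
         ("Emergency Planning and Response", []), ("Compliance Audits", [])] with hinit
    have hkeys : (causes.foldl pvStepA init).keys = pvPsmElements := keys_fold causes init pvInit_keys
    have hnd : (causes.foldl pvStepA init).keys.Nodup := by rw [hkeys]; decide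
    have hitems := PySem.Dict.items_eq_map_keys (causes.foldl pvStepA init) hnd ([] : List (List (String × String)))
    rw [hkeys] at hitems
    have hinitD : ∀ n ∈ pvPsmElements, init.getD n ([] : List (List (String × String))) = [] := by
      rw [hinit]; decide
    have hX : (causes.foldl pvStepA init).items =
        pvPsmElements.map (fun name =>
          (name, (((causes.map pvLabel).zip causes).filter (fun p => p.1 == some name)).map (·.2))) := by
      rw [hitems]
      apply List.map_congr_left
      intro n hn
      rw [getD_fold, hinitD n hn, List.nil_append]
    rw [hX]
    rfl
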